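-- pv_equiv track=rewrite | github.com/brian98077/python_tools | binary_mul.py | binary_multiply
-- ===== SOURCE A (Python) =====
-- def binary_multiply(bin1, bin2):
--
--     if not bin1 or not bin2:
--         return "0"
--
--     bin1 = bin1.replace('0b', '')
--     bin2 = bin2.replace('0b', '')
--
--     if not all(c in '01' for c in bin1) or not all(c in '01' for c in bin2):
--         raise ValueError("input should contains only 0 and 1")
--
--     num1 = int(bin1, 2)
--     num2 = int(bin2, 2)
--
--     result = num1 * num2
--
--     return bin(result)[2:]
-- ===== SOURCE B (Python) =====
-- def binary_multiply(bin1, bin2):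
--
--     if not bin1 or not bin2:
--         return "0"
--
--     bin1 = bin1.replace('0b', '')
--     bin2 = bin2.replace('0b', '')
--
--     if not all(c in '01' for c in bin1) or not all(c in '01' for c in bin2):
--         raise ValueError("input should contains only 0 and 1")
--
--     # grade-school shift-and-add on little-endian bit lists (no int conversion)
--     a = [1 if c == '1' else 0 for c in reversed(bin1)]
--     acc = [0]
--     shift = 0
--     for c in reversed(bin2):
--         if c == '1':
--             acc = _add_bits(acc, [0] * shift + a)
--         shift += 1
--
--     while len(acc) > 1 and acc[-1] == 0:
--         acc.pop()
--     return ''.join('1' if b else '0' for b in reversed(acc))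
--
--
-- def _add_bits(x, y):
--     # ripple-carry addition of little-endian bit lists
--     res = []
--     carry = 0
--     i = 0
--     n = max(len(x), len(y))
--     while i < n or carry:
--         s = carry
--         if i < len(x):
--             s += x[i]
--         if i < len(y):
--             s += y[i]
--         res.append(s & 1)
--         carry = s >> 1
--         i += 1
--     return res
-- ===== Notes on version B (the rewrite author's own statement) =====
-- stated objective: alternative
-- what changed: Replaces int(bin1,2)*int(bin2,2) and bin()[2:] with grade-school shift-and-add binary multiplication on little-endian bit lists (ripple-carry adder, one shifted addition per set bit of bin2), keeping the preprocessing identical.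
-- outside the precondition, e.g. on binary_multiply('0b', '1'): A raises ValueError, B returns '0'
import Mathlib
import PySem

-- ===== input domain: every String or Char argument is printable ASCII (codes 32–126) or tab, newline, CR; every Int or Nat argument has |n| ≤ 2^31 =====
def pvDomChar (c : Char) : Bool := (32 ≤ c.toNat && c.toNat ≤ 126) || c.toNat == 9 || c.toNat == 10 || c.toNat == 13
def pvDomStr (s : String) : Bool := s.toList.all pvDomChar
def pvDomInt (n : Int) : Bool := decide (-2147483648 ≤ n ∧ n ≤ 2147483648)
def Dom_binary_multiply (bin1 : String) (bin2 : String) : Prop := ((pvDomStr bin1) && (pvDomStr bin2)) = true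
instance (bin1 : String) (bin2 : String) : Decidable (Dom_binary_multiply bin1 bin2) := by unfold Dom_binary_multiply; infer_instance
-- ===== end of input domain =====

-- B replaces int(bin1,2)*int(bin2,2) by grade-school shift-and-add on little-endian bit
-- lists (objective: alternative algorithm of similar cost); preprocessing kept identical.

-- ===== PORT A =====

-- int(s, 2) on a validated '01' string: fold 2*acc + bit (exact there; Pre_ guarantees validity)
def pvParseBin (s : List Char) : Nat :=
  s.foldl (fun a c => 2 * a + (if c = '1' then 1 else 0)) 0

-- bin(n) without the '0b' prefix, high bit first; returns [] for n = 0 (A guards that case)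
def pvToBin : Nat → List Char
  | n =>
    if h : n = 0 then []
    else pvToBin (n / 2) ++ [if n % 2 = 1 then '1' else '0']
decreasing_by exact Nat.div_lt_self (Nat.pos_of_ne_zero h) one_lt_two

def binary_multiply (bin1 : String) (bin2 : String) : String :=
  if bin1 = "" ∨ bin2 = "" then "0"
  else
    let b1 := (PySem.Str.replace bin1 "0b" "").toList
    let b2 := (PySem.Str.replace bin2 "0b" "").toList
    if ¬ (b1.all (fun c => c = '0' ∨ c = '1') ∧ b2.all (fun c => c = '0' ∨ c = '1'))
    then ""  -- raise ValueError (excluded by Pre_)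
    else
      let result := pvParseBin b1 * pvParseBin b2
      -- bin(result)[2:]  (bin(0)[2:] = "0")
      if result = 0 then "0" else String.mk (pvToBin result)

-- ===== PORT B =====

-- _add_bits: ripple-carry addition of little-endian bit lists (carry threaded explicitly);
-- the phase where one list is exhausted is the helper pvCarryAdd
def pvCarryAdd : List Nat → Nat → List Nat
  | [], c => if c = 0 then [] else [c]
  | x :: xs, c => (x + c) % 2 :: pvCarryAdd xs ((x + c) / 2)

def pvAddBits : List Nat → List Nat → Nat → List Nat
  | [], ys, c => pvCarryAdd ys c
  | x :: xs, [], c => (x + c) % 2 :: pvAddBits xs [] ((x + c) / 2)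
  | x :: xs, y :: ys, c => (x + y + c) % 2 :: pvAddBits xs ys ((x + y + c) / 2)

-- the 'for c in reversed(bin2)' shift-and-add loop
def pvMulLoop : List Char → List Nat → Nat → List Nat → List Nat
  | [], _, _, acc => acc
  | c :: cs, a, shift, acc =>
    pvMulLoop cs a (shift + 1)
      (if c = '1' then pvAddBits acc (List.replicate shift 0 ++ a) 0 else acc)

def binary_multiply_alt (bin1 : String) (bin2 : String) : String :=
  if bin1 = "" ∨ bin2 = "" then "0"
  else
    let b1 := (PySem.Str.replace bin1 "0b" "").toList
    let b2 := (PySem.Str.replace bin2 "0b" "").toList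
    if ¬ (b1.all (fun c => c = '0' ∨ c = '1') ∧ b2.all (fun c => c = '0' ∨ c = '1'))
    then ""  -- raise ValueError (excluded by Pre_)
    else
      let a := b1.reverse.map (fun c => if c = '1' then 1 else 0)
      let acc := pvMulLoop b2.reverse a 0 [0]
      -- pop trailing zeros (keeping one digit), then print high bit first
      let r := acc.reverse.dropWhile (· = 0)
      if r = [] then "0"
      else String.mk (r.map (fun b => if b = 1 then '1' else '0'))

-- ===== PRECONDITION & SPEC =====
-- Pre_ excludes exactly the inputs where A raises ValueError: a character other than 0/1
-- after the global '0b' removal, or an input that becomes empty after that removal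
-- (there int('', 2) raises).
def Pre_binary_multiply (bin1 : String) (bin2 : String) : Prop :=
  bin1 = "" ∨ bin2 = "" ∨
  ((PySem.Str.replace bin1 "0b" "").toList ≠ [] ∧
   (PySem.Str.replace bin2 "0b" "").toList ≠ [] ∧
   (PySem.Str.replace bin1 "0b" "").toList.all (fun c => c = '0' ∨ c = '1') ∧
   (PySem.Str.replace bin2 "0b" "").toList.all (fun c => c = '0' ∨ c = '1'))

instance (bin1 : String) (bin2 : String) : Decidable (Pre_binary_multiply bin1 bin2) := by
  unfold Pre_binary_multiply; infer_instance

def pvWitness_binary_multiply : String × String := ("0b101", "110")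

def Spec_binary_multiply (bin1 : String) (bin2 : String) (out : String) : Prop :=
  out = binary_multiply_alt bin1 bin2
instance (bin1 : String) (bin2 : String) (out : String) : Decidable (Spec_binary_multiply bin1 bin2 out) := by
  unfold Spec_binary_multiply; infer_instance

-- ===== CLAIM (what is proved, stated in full; the proofs are below) =====
def Claim_equal_binary_multiply : Prop := ∀ (bin1 : String) (bin2 : String), Dom_binary_multiply bin1 bin2 → Pre_binary_multiply bin1 bin2 → Spec_binary_multiply bin1 bin2 (binary_multiply bin1 bin2)

-- ===== LEMMAS AND PROOFS =====

-- value of a little-endian bit list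
def pvVal : List Nat → Nat
  | [] => 0
  | b :: bs => b + 2 * pvVal bs

-- value of a little-endian char list
def pvLVal : List Char → Nat
  | [] => 0
  | c :: cs => (if c = '1' then 1 else 0) + 2 * pvLVal cs

theorem pvVal_eq_zero_iff (l : List Nat) : pvVal l = 0 ↔ ∀ b ∈ l, b = 0 := by
  induction l with
  | nil => simp [pvVal]
  | cons b bs ih =>
    simp only [pvVal, List.mem_cons]
    constructor
    · intro h
      rintro x (rfl | hx)
      · omega
      · exact ih.mp (by omega) x hx
    · intro h
      have hb := h b (Or.inl rfl)
      have := ih.mpr (fun x hx => h x (Or.inr hx))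
      omega

theorem pvCarryAdd_val (x : List Nat) (c : Nat) : pvVal (pvCarryAdd x c) = pvVal x + c := by
  induction x generalizing c with
  | nil => by_cases h : c = 0 <;> simp [pvCarryAdd, h, pvVal]
  | cons b bs ih => simp [pvCarryAdd, pvVal, ih]; omega

theorem pvAddBits_val (x y : List Nat) (c : Nat) :
    pvVal (pvAddBits x y c) = pvVal x + pvVal y + c := by
  induction x generalizing y c with
  | nil => simp [pvAddBits, pvCarryAdd_val, pvVal]
  | cons b bs ih =>
    cases y with
    | nil => simp [pvAddBits, pvVal, ih]; omega
    | cons d ds => simp [pvAddBits, pvVal, ih]; omega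

theorem pvCarryAdd_bits (x : List Nat) (c : Nat) :
    (∀ b ∈ x, b ≤ 1) → c ≤ 1 → ∀ b ∈ pvCarryAdd x c, b ≤ 1 := by
  induction x generalizing c with
  | nil =>
    intro _ hc b hb
    by_cases h : c = 0 <;> simp [pvCarryAdd, h] at hb <;> omega
  | cons a as ih =>
    intro hx hc
    have ha := hx a (by simp)
    simp only [pvCarryAdd, List.mem_cons]
    rintro b (rfl | hb)
    · omega
    · exact ih ((a + c) / 2) (fun b hb => hx b (by simp [hb])) (by omega) b hb

theorem pvAddBits_bits (x y : List Nat) (c : Nat) :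
    (∀ b ∈ x, b ≤ 1) → (∀ b ∈ y, b ≤ 1) → c ≤ 1 → ∀ b ∈ pvAddBits x y c, b ≤ 1 := by
  induction x generalizing y c with
  | nil =>
    intro _ hy hc
    exact pvCarryAdd_bits y c hy hc
  | cons a as ih =>
    intro hx hy hc
    have ha := hx a (by simp)
    cases y with
    | nil =>
      simp only [pvAddBits, List.mem_cons]
      rintro b (rfl | hb)
      · omega
      · exact ih [] ((a + c) / 2) (fun b hb => hx b (by simp [hb])) (by simp) (by omega) b hb
    | cons d ds =>
      have hd := hy d (by simp)
      simp only [pvAddBits, List.mem_cons]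
      rintro b (rfl | hb)
      · omega
      · exact ih ds ((a + d + c) / 2) (fun b hb => hx b (by simp [hb]))
          (fun b hb => hy b (by simp [hb])) (by omega) b hb

theorem pvVal_replicate_append (n : Nat) (a : List Nat) :
    pvVal (List.replicate n 0 ++ a) = 2 ^ n * pvVal a := by
  induction n with
  | zero => simp [pvVal]
  | succ k ih => simp [List.replicate_succ, pvVal, ih]; ring

theorem pvMulLoop_val (cs : List Char) (a : List Nat) (shift : Nat) (acc : List Nat) :
    pvVal (pvMulLoop cs a shift acc) = pvVal acc + pvLVal cs * 2 ^ shift * pvVal a := by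
  induction cs generalizing shift acc with
  | nil => simp [pvMulLoop, pvLVal]
  | cons c cs ih =>
    simp only [pvMulLoop, ih, pvLVal]
    by_cases h : c = '1'
    · rw [if_pos h, if_pos h, pvAddBits_val, pvVal_replicate_append]
      ring
    · rw [if_neg h, if_neg h]
      ring

theorem pvMulLoop_bits (cs : List Char) (a : List Nat) (shift : Nat) (acc : List Nat)
    (ha : ∀ b ∈ a, b ≤ 1) (hacc : ∀ b ∈ acc, b ≤ 1) :
    ∀ b ∈ pvMulLoop cs a shift acc, b ≤ 1 := by
  induction cs generalizing shift acc with
  | nil => simpa [pvMulLoop] using hacc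
  | cons c cs ih =>
    simp only [pvMulLoop]
    apply ih
    by_cases h : c = '1'
    · simp only [h]
      apply pvAddBits_bits _ _ _ hacc _ (by omega)
      intro b hb
      rcases List.mem_append.mp hb with h1 | h1
      · simp [List.eq_of_mem_replicate h1]
      · exact ha b h1
    · simpa [h] using hacc

theorem pvToBin_nil_iff (n : Nat) : pvToBin n = [] ↔ n = 0 := by
  constructor
  · intro h
    by_contra hn
    rw [pvToBin] at h
    simp [hn] at h
  · rintro rfl; rw [pvToBin]; simp

-- stripped, reversed, rendered bit list = A's bin()[2:] rendering of its value
theorem pvStrip_eq_toBin (l : List Nat) (hl : ∀ b ∈ l, b ≤ 1) :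
    (l.reverse.dropWhile (· = 0)).map (fun b => if b = 1 then '1' else '0')
      = pvToBin (pvVal l) := by
  induction l with
  | nil => simp [pvVal, pvToBin]
  | cons b bs ih =>
    have hb : b ≤ 1 := hl b (by simp)
    have ihs := ih (fun x hx => hl x (by simp [hx]))
    simp only [pvVal, List.reverse_cons, List.dropWhile_append]
    by_cases hz : pvVal bs = 0
    · have hdrop : bs.reverse.dropWhile (· = 0) = [] := by
        apply List.dropWhile_eq_nil_iff.mpr
        intro x hx
        simpa using (pvVal_eq_zero_iff bs).mp hz x (List.mem_reverse.mp hx)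
      rw [hdrop, hz]
      simp only [List.isEmpty_nil, if_true]
      interval_cases b
      · rw [pvToBin]
        simp
      · rw [pvToBin]
        norm_num
        rw [pvToBin]
        simp [List.dropWhile]
    · have hne : ¬ (bs.reverse.dropWhile (· = 0)).isEmpty = true := by
        rw [List.isEmpty_iff]
        intro h
        apply hz
        rw [h] at ihs
        simp only [List.map_nil] at ihs
        have := ihs.symm
        exact (pvToBin_nil_iff _).mp this
      rw [if_neg hne, List.map_append, ihs]
      have h2 : b + 2 * pvVal bs ≠ 0 := by omega
      conv_rhs => rw [pvToBin]
      rw [dif_neg h2]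
      have hdiv : (b + 2 * pvVal bs) / 2 = pvVal bs := by omega
      have hmod : (b + 2 * pvVal bs) % 2 = b := by omega
      rw [hdiv, hmod]
      simp

-- foldl parse of a big-endian string = pvLVal of its reverse
theorem pvParseBin_eq_lval (s : List Char) : pvParseBin s = pvLVal s.reverse := by
  induction s using List.reverseRecOn with
  | nil => simp [pvParseBin, pvLVal]
  | append_singleton s c ih =>
    simp only [pvParseBin, List.foldl_append, List.foldl_cons, List.foldl_nil,
      List.reverse_append, List.reverse_cons, List.reverse_nil, List.nil_append,
      List.cons_append, pvLVal]
    rw [pvParseBin] at ih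
    rw [ih]
    ring

theorem pvLVal_eq_val_map (s : List Char) :
    pvVal (s.map (fun c => if c = '1' then 1 else 0)) = pvLVal s := by
  induction s with
  | nil => simp [pvVal, pvLVal]
  | cons c cs ih => simp [pvVal, pvLVal, ih]

-- ===== VERDICT (by name: the statement is the Claim_ definition above) =====
theorem binary_multiply_spec : Claim_equal_binary_multiply := by
  intro bin1 bin2 _ hpre
  unfold Spec_binary_multiply
  rcases hpre with h | h | hpre
  · rw [binary_multiply, binary_multiply_alt, if_pos (Or.inl h), if_pos (Or.inl h)]
  · rw [binary_multiply, binary_multiply_alt, if_pos (Or.inr h), if_pos (Or.inr h)]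
  by_cases hor' : bin1 = "" ∨ bin2 = ""
  · rw [binary_multiply, binary_multiply_alt, if_pos hor', if_pos hor']
  obtain ⟨hne1, hne2, hv1, hv2⟩ := hpre
  have hor : ¬ (bin1 = "" ∨ bin2 = "") := hor'
  have hvv : ¬¬ ((PySem.Str.replace bin1 "0b" "").toList.all (fun c => c = '0' ∨ c = '1') ∧
      (PySem.Str.replace bin2 "0b" "").toList.all (fun c => c = '0' ∨ c = '1')) :=
    not_not_intro ⟨hv1, hv2⟩
  simp only [binary_multiply, binary_multiply_alt]
  rw [if_neg hor, if_neg hor, if_neg hvv, if_neg hvv]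
  set b1 := (PySem.Str.replace bin1 "0b" "").toList with hb1
  set b2 := (PySem.Str.replace bin2 "0b" "").toList with hb2
  set a := b1.reverse.map (fun c => if c = '1' then 1 else 0) with hadef
  have ha1 : ∀ b ∈ a, b ≤ 1 := by
    intro b hb
    simp only [hadef, List.mem_map] at hb
    obtain ⟨c, _, rfl⟩ := hb
    split <;> omega
  have hbits : ∀ b ∈ pvMulLoop b2.reverse a 0 [0], b ≤ 1 :=
    pvMulLoop_bits _ _ _ _ ha1 (by simp) 
  have hval : pvVal (pvMulLoop b2.reverse a 0 [0]) = pvParseBin b1 * pvParseBin b2 := by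
    rw [pvMulLoop_val]
    simp only [pvVal, pow_zero, mul_one]
    rw [hadef, pvLVal_eq_val_map, ← pvParseBin_eq_lval, ← pvParseBin_eq_lval]
    ring
  set acc := pvMulLoop b2.reverse a 0 [0] with haccdef
  have hstrip := pvStrip_eq_toBin acc hbits
  rw [hval] at hstrip
  by_cases hz : pvParseBin b1 * pvParseBin b2 = 0
  · rw [if_pos hz]
    rw [hz] at hstrip
    have hz2 : pvToBin 0 = [] := (pvToBin_nil_iff 0).mpr rfl
    rw [hz2] at hstrip
    have : acc.reverse.dropWhile (· = 0) = [] := List.map_eq_nil_iff.mp hstrip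
    rw [if_pos this]
  · rw [if_neg hz]
    have hne : acc.reverse.dropWhile (· = 0) ≠ [] := by
      intro h
      apply hz
      rw [h] at hstrip
      simp only [List.map_nil] at hstrip
      exact (pvToBin_nil_iff _).mp hstrip.symm
    rw [if_neg hne, hstrip]
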